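-- pv_equiv track=rewrite | github.com/patrikmnich/AoC-2024 | day04/day04.py | get_main_diagonals
-- ===== SOURCE A (Python) =====
-- def get_main_diagonals(rows):
--     diagonals = []
--     num_rows = len(rows)
--     num_cols = len(rows[0])
--
--     # Main diagonals starting from first row
--     for col_start in range(num_cols):
--         diagonal = "".join(rows[row][col_start + row] for row in range(min(num_rows, num_cols - col_start)))
--         diagonals.append(diagonal)
--
--     # Main diagonals starting from first column (excluding the top-left corner to avoid duplicates)
--     for row_start in range(1, num_rows):
--         diagonal = "".join(rows[row_start + row][row] for row in range(min(num_rows - row_start, num_cols)))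
--         diagonals.append(diagonal)
--
--     return diagonals
-- ===== SOURCE B (Python) =====
-- def get_main_diagonals(rows):
--     num_rows = len(rows)
--     num_cols = len(rows[0])
--     # one scatter pass: every cell goes into the bucket of its diagonal key c - r
--     cells = [(c - r, row[c]) for r, row in enumerate(rows) for c in range(num_cols)]
--     buckets = {}
--     for key, ch in cells:
--         buckets.setdefault(key, []).append(ch)
--     # emit in A's order: keys 0..num_cols-1, then -1 down to -(num_rows-1)
--     keys = list(range(num_cols)) + list(range(-1, -num_rows, -1))
--     return ["".join(buckets.get(d, [])) for d in keys]
-- ===== Notes on version B (the rewrite author's own statement) =====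
-- stated objective: alternative
-- what changed: A gathers each diagonal with its own indexed inner loop (two loop families with min-length arithmetic); B makes one row-major scatter pass that buckets every character under its diagonal key col-row in a dict, then joins the buckets in A's key order (0..cols-1, then -1 down to -(rows-1)).
import Mathlib
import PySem

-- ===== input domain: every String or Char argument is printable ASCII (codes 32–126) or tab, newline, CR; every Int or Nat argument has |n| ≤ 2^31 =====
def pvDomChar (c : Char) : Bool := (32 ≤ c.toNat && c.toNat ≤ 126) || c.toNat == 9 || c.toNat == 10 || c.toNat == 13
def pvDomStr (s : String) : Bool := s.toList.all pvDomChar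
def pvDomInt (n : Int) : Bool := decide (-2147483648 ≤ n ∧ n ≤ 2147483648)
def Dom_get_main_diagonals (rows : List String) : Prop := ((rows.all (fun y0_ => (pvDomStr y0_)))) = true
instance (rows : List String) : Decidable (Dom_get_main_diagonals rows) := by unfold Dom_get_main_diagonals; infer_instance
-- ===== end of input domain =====

-- B replaces A's two per-diagonal gather loops by one scatter pass into a dict keyed by col - row,
-- then emits the buckets in A's key order (alternative decomposition; same asymptotic cost).

-- ===== PORT A =====
-- rows[i][j]: the '!' default is unreachable on inputs satisfying Pre_ (Python raises exactly there)
def pvChAt (s : String) (i : Int) : Char := (PySem.Str.pyGet? s i).getD '!'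

def get_main_diagonals (rows : List String) : List String :=
  let n : Int := rows.length
  let m : Int := PySem.Str.len ((PySem.List.pyGet? rows 0).getD "")
  (PySem.List.pyRange 0 m 1).map (fun s =>
    String.ofList ((PySem.List.pyRange 0 (min n (m - s)) 1).map
      (fun r => pvChAt (PySem.List.pyGetD rows r "") (s + r))))
  ++ (PySem.List.pyRange 1 n 1).map (fun t =>
    String.ofList ((PySem.List.pyRange 0 (min (n - t) m) 1).map
      (fun r => pvChAt (PySem.List.pyGetD rows (t + r) "") r)))

-- ===== PORT B =====
-- the flat list of (diagonal key, character) pairs, in row-major scan order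
def pvCells (rows : List String) (m : Int) : List (Int × Char) :=
  (PySem.List.enumerate rows).flatMap (fun p =>
    (PySem.List.pyRange 0 m 1).map (fun c => (c - p.1, pvChAt p.2 c)))

def get_main_diagonals_alt (rows : List String) : List String :=
  let n : Int := rows.length
  let m : Int := PySem.Str.len ((PySem.List.pyGet? rows 0).getD "")
  let buckets : PySem.Dict Int (List Char) :=
    (pvCells rows m).foldl (fun d p => d.modify p.1 [] (· ++ [p.2])) PySem.Dict.empty
  (PySem.List.pyRange 0 m 1 ++ PySem.List.pyRange (-1) (-n) (-1)).map
    (fun dk => String.ofList (buckets.getD dk []))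

-- ===== PRECONDITION & SPEC =====
-- Pre_ excludes exactly the inputs where Python A raises an IndexError: the empty list
-- (rows[0]) and ragged inputs with a row shorter than rows[0] (out-of-range char index).
def Pre_get_main_diagonals (rows : List String) : Prop :=
  rows ≠ [] ∧ ∀ s ∈ rows, PySem.Str.len (rows.headD "") ≤ PySem.Str.len s
instance (rows : List String) : Decidable (Pre_get_main_diagonals rows) := by
  unfold Pre_get_main_diagonals; infer_instance
def pvWitness_get_main_diagonals : List String := ["abc", "def", "ghi"]
def Spec_get_main_diagonals (rows : List String) (out : List String) : Prop :=
  out = get_main_diagonals_alt rows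
instance (rows : List String) (out : List String) : Decidable (Spec_get_main_diagonals rows out) := by
  unfold Spec_get_main_diagonals; infer_instance

-- ===== CLAIM (what is proved, stated in full; the proofs are below) =====
def Claim_equal_get_main_diagonals : Prop := ∀ (rows : List String), Dom_get_main_diagonals rows → Pre_get_main_diagonals rows → Spec_get_main_diagonals rows (get_main_diagonals rows)

-- ===== LEMMAS AND PROOFS =====

-- the characters of diagonal key d, read top-to-bottom starting at column offset j = d + row index
def pvF (L : List String) (j m : Int) : List Char :=
  match L with
  | [] => []
  | row :: t => (if 0 ≤ j ∧ j < m then [pvChAt row j] else []) ++ pvF t (j + 1) m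

theorem pvBucketD (rows : List String) (m dk : Int) :
    ((pvCells rows m).foldl (fun d p => d.modify p.1 [] (· ++ [p.2])) PySem.Dict.empty).getD dk []
      = ((pvCells rows m).filter (fun p => p.1 == dk)).map (·.2) := by
  rw [PySem.Dict.getD_foldl_modify_append]
  simp [PySem.Dict.getD_empty]

theorem pvRowFilter (row : String) (r0 d m : Int) :
    (((PySem.List.pyRange 0 m 1).map (fun c => (c - r0, pvChAt row c))).filter
        (fun p => p.1 == d)).map (·.2)
      = if 0 ≤ d + r0 ∧ d + r0 < m then [pvChAt row (d + r0)] else [] := by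
  rw [List.filter_map]
  have hpred : ((fun p : Int × Char => p.1 == d) ∘ (fun c : Int => (c - r0, pvChAt row c)))
      = fun c : Int => c == d + r0 := by
    funext c
    by_cases h : c = d + r0
    · simp [Function.comp, h]
    · simp [Function.comp, h]
      omega
  rw [hpred, List.filter_beq]
  by_cases h : 0 ≤ d + r0 ∧ d + r0 < m
  · have hm : d + r0 ∈ PySem.List.pyRange 0 m 1 := PySem.List.mem_pyRange_one.mpr ⟨h.1, h.2⟩
    rw [List.count_eq_one_of_mem (PySem.List.nodup_pyRange_one 0 m) hm]
    simp [h]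
  · have hm : d + r0 ∉ PySem.List.pyRange 0 m 1 := by
      intro hc; exact h (PySem.List.mem_pyRange_one.mp hc)
    rw [List.count_eq_zero_of_not_mem hm]
    simp [h]

theorem pvFlatFilter (L : List String) (r0 d m : Int) :
    (((PySem.List.enumerate L r0).flatMap (fun p =>
        (PySem.List.pyRange 0 m 1).map (fun c => (c - p.1, pvChAt p.2 c)))).filter
          (fun p => p.1 == d)).map (·.2)
      = pvF L (d + r0) m := by
  induction L generalizing r0 with
  | nil => simp [PySem.List.enumerate, pvF]
  | cons row t ih =>
    rw [PySem.List.enumerate_cons]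
    simp only [List.flatMap_cons, List.filter_append, List.map_append]
    rw [pvRowFilter, ih (r0 + 1)]
    have : d + (r0 + 1) = d + r0 + 1 := by ring
    rw [this]
    rfl

theorem pvCellsFilter (rows : List String) (m d : Int) :
    ((pvCells rows m).filter (fun p => p.1 == d)).map (·.2) = pvF rows d m := by
  have := pvFlatFilter rows 0 d m
  simpa [pvCells] using this

theorem pvF_of_ge (L : List String) : ∀ (j m : Int), m ≤ j → pvF L j m = [] := by
  induction L with
  | nil => intro j m h; rfl
  | cons row t ih =>
    intro j m h
    simp only [pvF]
    rw [if_neg (by omega), ih (j + 1) m (by omega)]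
    rfl

theorem pvF_pos (L : List String) : ∀ (s m : Int), 0 ≤ s →
    pvF L s m = (List.range (min L.length (m - s).toNat)).map
      (fun k => pvChAt (L.getD k "") (s + k)) := by
  induction L with
  | nil => intro s m _; simp [pvF]
  | cons row t ih =>
    intro s m hs
    by_cases hlt : s < m
    · have h1 : min (row :: t).length (m - s).toNat
          = min t.length (m - (s + 1)).toNat + 1 := by
        simp only [List.length_cons]; omega
      rw [h1, List.range_succ_eq_map, List.map_cons, List.map_map]
      simp only [pvF]
      rw [if_pos (show 0 ≤ s ∧ s < m from ⟨hs, hlt⟩), ih (s + 1) m (by omega)]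
      simp only [Nat.cast_zero, add_zero, List.getD_cons_zero, List.singleton_append]
      congr 1
      apply List.map_congr_left
      intro k _
      simp only [Function.comp_apply, Nat.succ_eq_add_one, List.getD_cons_succ]
      congr 1
      push_cast; ring
    · have h0 : (m - s).toNat = 0 := by omega
      simp only [pvF, if_neg (by omega : ¬(0 ≤ s ∧ s < m)), h0]
      rw [pvF_of_ge t (s + 1) m (by omega)]
      simp

theorem pvF_neg : ∀ (t : Nat) (L : List String) (m : Int),
    pvF L (-(t : Int)) m = pvF (L.drop t) 0 m := by
  intro t
  induction t with
  | zero => intro L m; simp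
  | succ k ih =>
    intro L m
    cases L with
    | nil => rfl
    | cons row tl =>
      simp only [pvF, List.drop_succ_cons]
      rw [if_neg (by omega : ¬(0 ≤ -((k + 1 : Nat) : Int) ∧ -((k + 1 : Nat) : Int) < m))]
      have : -((k + 1 : Nat) : Int) + 1 = -(k : Int) := by push_cast; ring
      rw [this, ih tl m]
      rfl

theorem pvGetD_drop (L : List String) (i j : Nat) (d : String) :
    (L.drop i).getD j d = L.getD (i + j) d := by
  simp [List.getD_eq_getElem?_getD, List.getElem?_drop]

theorem pvEqualAll (rows : List String) :
    get_main_diagonals rows = get_main_diagonals_alt rows := by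
  simp only [get_main_diagonals, get_main_diagonals_alt, List.map_append]
  set n : Int := (rows.length : Int) with hn
  set m : Int := PySem.Str.len ((PySem.List.pyGet? rows 0).getD "") with hm
  congr 1
  · -- diagonals starting in the first row: keys 0 .. m-1
    apply List.map_congr_left
    intro s hs
    obtain ⟨hs0, _⟩ := PySem.List.mem_pyRange_one.mp hs
    rw [pvBucketD, pvCellsFilter, pvF_pos rows s m hs0,
      PySem.List.pyRange_one, List.map_map]
    have hXY : (min n (m - s) - 0).toNat = min rows.length (m - s).toNat := by omega
    rw [hXY]
    refine congrArg String.ofList ?_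
    apply List.map_congr_left
    intro k _
    simp only [Function.comp_apply, zero_add, PySem.List.pyGetD_natCast]
  · -- diagonals starting in the first column: keys -1 .. -(n-1)
    rw [PySem.List.pyRange_neg_one, PySem.List.pyRange_one, List.map_map, List.map_map]
    have hlen : (n - 1).toNat = (-1 - -n).toNat := by omega
    rw [← hlen]
    apply List.map_congr_left
    intro k _
    simp only [Function.comp_apply]
    have hkey : (-1 - (k : Int)) = -(((k + 1 : Nat)) : Int) := by push_cast; ring
    rw [hkey, pvBucketD, pvCellsFilter, pvF_neg (k + 1) rows m,
      pvF_pos (rows.drop (k + 1)) 0 m le_rfl,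
      PySem.List.pyRange_one, List.map_map]
    have hXY : (min (n - (1 + (k : Int))) m - 0).toNat
        = min (rows.drop (k + 1)).length (m - 0).toNat := by
      simp only [List.length_drop]; omega
    rw [hXY]
    refine congrArg String.ofList ?_
    apply List.map_congr_left
    intro j _
    simp only [Function.comp_apply, zero_add]
    rw [show (1 : Int) + (k : Int) + (j : Int) = ((k + 1 + j : Nat) : Int) by push_cast; ring,
      PySem.List.pyGetD_natCast, pvGetD_drop]

-- ===== VERDICT (by name: the statement is the Claim_ definition above) =====
theorem get_main_diagonals_spec : Claim_equal_get_main_diagonals := by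
  intro rows _ _
  unfold Spec_get_main_diagonals
  exact pvEqualAll rows
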